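-- pv_equiv track=rewrite | github.com/root-not-sudo/pyplay | Code Fights/Arcade/The Core/04 - Loop Tunnel/28 - Lineup.py | lineUp
-- ===== SOURCE A (Python) =====
-- def lineUp(commands):
--     turn, sameface = 0, 0
--     for i in commands:
--         if i == 'L' or i == 'R':
--             turn += 1
--         if turn % 2 == 0:
--             sameface += 1
--     return sameface
-- ===== SOURCE B (Python) =====
-- def lineUp(commands):
--     n = len(commands)
--     turns = [i for i, c in enumerate(commands) if c == 'L' or c == 'R']
--     bounds = turns + [n]
--     total = bounds[0]
--     k = 0
--     for a, b in zip(bounds, bounds[1:]):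
--         k += 1
--         if k % 2 == 0:
--             total += b - a
--     return total
-- ===== Notes on version B (the rewrite author's own statement) =====
-- stated objective: alternative
-- what changed: B first builds the table of turn ('L'/'R') indices plus a terminal boundary, then sums the lengths of the even-parity runs between consecutive boundaries, instead of testing the cumulative turn parity at every character.
import Mathlib
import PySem

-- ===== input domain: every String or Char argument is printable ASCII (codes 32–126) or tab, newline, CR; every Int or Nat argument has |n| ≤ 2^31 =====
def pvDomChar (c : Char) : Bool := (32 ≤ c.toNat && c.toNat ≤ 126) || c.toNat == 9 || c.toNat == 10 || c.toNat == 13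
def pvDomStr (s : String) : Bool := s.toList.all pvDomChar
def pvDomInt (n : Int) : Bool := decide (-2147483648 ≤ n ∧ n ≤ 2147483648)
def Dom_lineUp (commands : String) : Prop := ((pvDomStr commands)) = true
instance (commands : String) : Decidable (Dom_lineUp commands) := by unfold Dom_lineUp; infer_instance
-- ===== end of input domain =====

-- B builds the turn-index table plus a terminal boundary and sums the even-parity run gaps,
-- instead of A's per-character cumulative-parity test; alternative decomposition, same cost.

-- ===== PORT A =====
-- A's loop over the characters carrying (turn, sameface).
def lineUpGo (cs : List Char) (turn sameface : Int) : Int :=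
  match cs with
  | [] => sameface
  | c :: rest =>
    let turn' := if c = 'L' ∨ c = 'R' then turn + 1 else turn
    let sameface' := if PySem.Int.mod turn' 2 = 0 then sameface + 1 else sameface
    lineUpGo rest turn' sameface'

def lineUp (commands : String) : Int :=
  lineUpGo commands.toList 0 0

-- ===== PORT B =====
-- the comprehension [i for i, c in enumerate(commands) if c == 'L' or c == 'R'], with running index i
def lineUpTurns (cs : List Char) (i : Int) : List Int :=
  match cs with
  | [] => []
  | c :: rest => if c = 'L' ∨ c = 'R' then i :: lineUpTurns rest (i + 1) else lineUpTurns rest (i + 1)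

def lineUp_alt (commands : String) : Int :=
  let cs := commands.toList
  let n : Int := cs.length
  let turns := lineUpTurns cs 0
  let bounds := turns ++ [n]
  let total := bounds.headD 0    -- bounds[0]; bounds is nonempty, so this is exact
  let res := (bounds.zip bounds.tail).foldl
    (fun (st : Int × Int) ab =>
      let k := st.1 + 1
      (k, if PySem.Int.mod k 2 = 0 then st.2 + (ab.2 - ab.1) else st.2))
    ((0 : Int), total)
  res.2

-- ===== PRECONDITION & SPEC =====
def Spec_lineUp (commands : String) (out : Int) : Prop := out = lineUp_alt commands
instance (commands : String) (out : Int) : Decidable (Spec_lineUp commands out) := by unfold Spec_lineUp; infer_instance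

-- ===== CLAIM (what is proved, stated in full; the proofs are below) =====
def Claim_equal_lineUp : Prop := ∀ (commands : String), Dom_lineUp commands → Spec_lineUp commands (lineUp commands)

-- ===== LEMMAS AND PROOFS =====

-- proof-side: count of characters at even cumulative parity, parity as a Bool
def pvPb (cs : List Char) (e : Bool) : Int :=
  match cs with
  | [] => 0
  | c :: rest =>
    if c = 'L' ∨ c = 'R' then (if e then 0 else 1) + pvPb rest (!e)
    else (if e then 1 else 0) + pvPb rest e

-- proof-side: alternating gap sum over the boundary pairs
def pvPairSum (f : Bool) (l : List (Int × Int)) : Int :=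
  match l with
  | [] => 0
  | ab :: rest => (if f then ab.2 - ab.1 else 0) + pvPairSum (!f) rest

theorem pv_mod_emod (t : Int) : PySem.Int.mod t 2 = t % 2 :=
  PySem.Int.mod_eq_emod_of_pos (by omega)

theorem pvA_bridge (cs : List Char) (t s : Int) :
    lineUpGo cs t s = s + pvPb cs (decide (PySem.Int.mod t 2 = 0)) := by
  induction cs generalizing t s with
  | nil => simp [lineUpGo, pvPb]
  | cons c rest ih =>
    simp only [lineUpGo, pvPb]
    by_cases hc : c = 'L' ∨ c = 'R'
    · simp only [hc, if_true]
      rw [ih]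
      simp only [pv_mod_emod]
      rcases Int.emod_two_eq t with h | h
      · have h2 : (t + 1) % 2 = 1 := by omega
        simp [h, h2]
      · have h2 : (t + 1) % 2 = 0 := by omega
        simp [h, h2]
        ring
    · simp only [hc, if_false]
      rw [ih]
      simp only [pv_mod_emod]
      rcases Int.emod_two_eq t with h | h <;> simp [h] <;> ring

-- B's value expressed with explicit start offset i and Bool parity
def pvSb (e : Bool) (i : Int) (cs : List Char) : Int :=
  let bounds := lineUpTurns cs i ++ [i + (cs.length : Int)]
  (if e then bounds.headD 0 - i else 0) + pvPairSum (!e) (bounds.zip bounds.tail)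

theorem pv_bounds_ne_nil (cs : List Char) (i : Int) :
    lineUpTurns cs i ++ [i + (cs.length : Int)] ≠ [] := by
  simp

theorem pv_main (cs : List Char) (e : Bool) (i : Int) :
    pvPb cs e = pvSb e i cs := by
  induction cs generalizing e i with
  | nil => cases e <;> simp [pvPb, pvSb, lineUpTurns, pvPairSum]
  | cons c rest ih =>
    by_cases hc : c = 'L' ∨ c = 'R'
    · -- turn character: prepend boundary i, flip parity
      have hb := ih (!e) (i + 1)
      simp only [pvSb, lineUpTurns, hc, if_true, pvPb] at *
      set bR := lineUpTurns rest (i + 1) ++ [(i + 1) + (rest.length : Int)] with hbR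
      have hsame : lineUpTurns rest (i + 1) ++ [i + (((c :: rest).length : Nat) : Int)] = bR := by
        simp only [hbR, List.length_cons]
        push_cast
        ring_nf
      rw [List.cons_append, hsame]
      obtain ⟨b0, bt, hbt⟩ : ∃ b0 bt, bR = b0 :: bt := by
        cases h : bR with
        | nil => exact absurd (hbR ▸ h) (pv_bounds_ne_nil rest (i + 1))
        | cons b0 bt => exact ⟨b0, bt, rfl⟩
      rw [hbt] at hb ⊢
      simp only [List.zip_cons_cons, List.tail_cons, pvPairSum, List.headD, Bool.not_not] at hb ⊢
      cases e <;> simp at hb ⊢ <;> linarith [hb]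
    · -- non-turn character: same boundary list, start shifted by one
      have hb := ih e (i + 1)
      simp only [pvSb, lineUpTurns, hc, if_false, pvPb] at *
      set bR := lineUpTurns rest (i + 1) ++ [(i + 1) + (rest.length : Int)] with hbR
      have hsame : lineUpTurns rest (i + 1) ++ [i + (((c :: rest).length : Nat) : Int)] = bR := by
        simp only [hbR, List.length_cons]
        push_cast
        ring_nf
      rw [hsame]
      obtain ⟨b0, bt, hbt⟩ : ∃ b0 bt, bR = b0 :: bt := by
        cases h : bR with
        | nil => exact absurd (hbR ▸ h) (pv_bounds_ne_nil rest (i + 1))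
        | cons b0 bt => exact ⟨b0, bt, rfl⟩
      rw [hbt] at hb ⊢
      simp only [List.headD] at hb ⊢
      cases e <;> simp at hb ⊢ <;> linarith [hb]

-- B's concrete fold equals acc + the alternating gap sum
theorem pvB_fold (l : List (Int × Int)) (k acc : Int) :
    (l.foldl (fun (st : Int × Int) ab =>
        let k := st.1 + 1
        (k, if PySem.Int.mod k 2 = 0 then st.2 + (ab.2 - ab.1) else st.2)) (k, acc)).2
      = acc + pvPairSum (decide (PySem.Int.mod (k + 1) 2 = 0)) l := by
  induction l generalizing k acc with
  | nil => simp [pvPairSum]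
  | cons ab rest ih =>
    simp only [List.foldl, pvPairSum]
    rw [ih]
    simp only [pv_mod_emod]
    rcases Int.emod_two_eq (k + 1) with h | h
    · have h2 : (k + 1 + 1) % 2 = 1 := by omega
      simp [h, h2]
      ring
    · have h2 : (k + 1 + 1) % 2 = 0 := by omega
      simp [h, h2]

-- ===== VERDICT (by name: the statement is the Claim_ definition above) =====
theorem lineUp_spec : Claim_equal_lineUp := by
  intro commands _
  unfold Spec_lineUp lineUp lineUp_alt
  rw [pvA_bridge, pvB_fold]
  have h1 : (decide (PySem.Int.mod (0 : Int) 2 = 0)) = true := by decide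
  have h0 : (decide (PySem.Int.mod ((0 : Int) + 1) 2 = 0)) = false := by decide
  rw [h1, h0]
  have hm := pv_main commands.toList true 0
  simp only [pvSb, if_true, Bool.not_true] at hm
  simp [hm]
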